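-- pv_equiv track=rewrite | github.com/Cherry-qwq/LcRL-Open | scripts/data_process/build_sft_mkqa.py | _get_target_langs
-- ===== SOURCE A (Python) =====
-- from typing import List, Dict, Optional
--
-- language_to_high_resource = {
--     'fr': 'it',
--     'es': 'fr',
--     'pt': 'fr',
--     'it': 'fr',
--     'de': 'fr',
--     'en': 'fr',
--     'ru': 'fr',
--     'zh_cn': 'ja',
--     'zh': 'ja',
--     'ja': 'zh',
--     'ko': 'ja',
--     'th': 'ja',
--     'fi': 'ru',
--     'ar': 'fr',
-- }
--
-- def _norm_lang(lang: Optional[str]) -> Optional[str]: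
--     if not lang:
--         return None
--     lang = lang.lower()
--     if lang in ["zh-cn", "zh_cn", "zh-hans"]:
--         return "zh"
--     return lang
--
-- def _get_high_resource_lang(lang: str) -> Optional[str]:
--     lang = _norm_lang(lang)
--     return language_to_high_resource.get(lang)
--
-- def _get_target_langs(orig_lang: str) -> List[str]:
--     """
--     根据原始语言，计算出包含原始语言在内的 5 种检索语言列表
--     """
--     orig_lang = _norm_lang(orig_lang)
--     if not orig_lang:
--         return ['en']
--
--     high_resource_lang_A = _get_high_resource_lang(orig_lang)
--     high_resource_lang_B = _get_high_resource_lang('en')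
--     high_resource_lang_C = (
--         _get_high_resource_lang(high_resource_lang_A)
--         if high_resource_lang_A else None
--     )
--
--     candidate_langs = ['en', high_resource_lang_A,
--                        high_resource_lang_B, high_resource_lang_C]
--
--     search_langs = []
--     search_langs.append(orig_lang)
--
--     for l in candidate_langs:
--         if not l:
--             continue
--         l = _norm_lang(l)
--         if l and l not in search_langs:
--             search_langs.append(l)
--
--     fallback_langs = ['fr', 'it', 'zh', 'ja', 'ru', 'ar', 'fi']
--     target_total_langs = 5
--
--     if len(search_langs) < target_total_langs:
--         for fb in fallback_langs:
--             fb = _norm_lang(fb)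
--             if fb not in search_langs:
--                 search_langs.append(fb)
--                 if len(search_langs) >= target_total_langs:
--                     break
--
--     return search_langs[:target_total_langs]
-- ===== SOURCE B (Python) =====
-- from typing import List, Optional
--
-- language_to_high_resource = {
--     'fr': 'it', 'es': 'fr', 'pt': 'fr', 'it': 'fr', 'de': 'fr',
--     'en': 'fr', 'ru': 'fr', 'zh_cn': 'ja', 'zh': 'ja', 'ja': 'zh',
--     'ko': 'ja', 'th': 'ja', 'fi': 'ru', 'ar': 'fr',
-- }
--
-- def _norm_lang(lang):
--     if not lang:
--         return None
--     lang = lang.lower()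
--     if lang in ["zh-cn", "zh_cn", "zh-hans"]:
--         return "zh"
--     return lang
--
-- # B: no candidate/fallback dedup loops at all.  Everything after the original
-- # language is determined solely by its high-resource language hA (one of
-- # None/'fr'/'it'/'ja'/'zh'/'ru'), so the whole priority order collapses into a
-- # precomputed table of constant tails; the answer is the original language
-- # followed by the first 4 tail entries different from it.
-- _TAILS = {
--     None: ['en', 'fr', 'it', 'zh', 'ja', 'ru', 'ar', 'fi'],
--     'fr': ['en', 'fr', 'it', 'zh', 'ja', 'ru', 'ar', 'fi'],
--     'it': ['en', 'it', 'fr', 'zh', 'ja', 'ru', 'ar', 'fi'],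
--     'ja': ['en', 'ja', 'fr', 'zh', 'it', 'ru', 'ar', 'fi'],
--     'zh': ['en', 'zh', 'fr', 'ja', 'it', 'ru', 'ar', 'fi'],
--     'ru': ['en', 'ru', 'fr', 'it', 'zh', 'ja', 'ar', 'fi'],
-- }
--
-- def _get_target_langs(orig_lang):
--     o = _norm_lang(orig_lang)
--     if not o:
--         return ['en']
--     hA = language_to_high_resource.get(o)
--     return [o] + [x for x in _TAILS[hA] if x != o][:4]
-- ===== Notes on version B (the rewrite author's own statement) =====
-- stated objective: alternative
-- what changed: Removes A's ordered-dedup candidate loop and conditional fallback loop entirely: since everything after the original language depends only on its high-resource language, B looks up a precomputed constant tail in a 6-entry table and returns the original language followed by the first 4 tail entries different from it (a filter+take instead of any dedup loop).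
import Mathlib
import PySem

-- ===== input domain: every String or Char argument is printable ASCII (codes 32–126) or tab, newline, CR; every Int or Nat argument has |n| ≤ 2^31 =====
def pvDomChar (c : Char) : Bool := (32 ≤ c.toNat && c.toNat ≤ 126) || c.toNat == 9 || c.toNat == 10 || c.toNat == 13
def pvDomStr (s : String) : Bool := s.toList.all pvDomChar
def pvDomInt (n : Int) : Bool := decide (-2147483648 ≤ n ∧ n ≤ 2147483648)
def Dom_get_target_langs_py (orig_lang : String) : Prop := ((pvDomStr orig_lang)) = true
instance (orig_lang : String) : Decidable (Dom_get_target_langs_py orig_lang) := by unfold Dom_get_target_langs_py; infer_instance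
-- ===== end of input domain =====

-- B drops A's two dedup loops for a precomputed per-high-resource-language tail table plus one filter+take (objective: alternative).

-- ===== PORT A =====
-- shared module helpers (language_to_high_resource, _norm_lang, _get_high_resource_lang)
def langMap : PySem.Dict String String := PySem.Dict.ofList
  [("fr","it"),("es","fr"),("pt","fr"),("it","fr"),("de","fr"),("en","fr"),("ru","fr"),
   ("zh_cn","ja"),("zh","ja"),("ja","zh"),("ko","ja"),("th","ja"),("fi","ru"),("ar","fr")]

-- _norm_lang: on Optional[str]; 'not lang' is None or ""
def normLang : Option String → Option String
  | none => none
  | some lang =>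
    if lang = "" then none
    else
      let l := PySem.Str.lower lang
      if l = "zh-cn" || l = "zh_cn" || l = "zh-hans" then some "zh" else some l

-- _get_high_resource_lang; dict.get(None) on a str-keyed dict finds nothing, hence the none branch
def highRes (lang : Option String) : Option String :=
  match normLang lang with
  | none => none
  | some l => PySem.Dict.get? langMap l

-- the fallback for-loop with its in-loop break; the none branch just continues
def fallbackLoop : List String → List String → List String
  | acc, [] => acc
  | acc, fb :: rest =>
    match normLang (some fb) with
    | none => fallbackLoop acc rest
    | some f =>
      if f ∈ acc then fallbackLoop acc rest
      else
        let acc' := acc ++ [f]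
        if 5 ≤ acc'.length then acc' else fallbackLoop acc' rest

def get_target_langs_py (orig_lang : String) : List String :=
  match normLang (some orig_lang) with
  | none => ["en"]
  | some o =>
    let hA := highRes (some o)
    let hB := highRes (some "en")
    let hC := if hA.isSome then highRes hA else none
    let candidates : List (Option String) := [some "en", hA, hB, hC]
    -- 'if not l: continue; l = _norm_lang(l); if l and l not in …': a falsy l and a falsy
    -- _norm_lang(l) coincide with normLang returning none
    let search := candidates.foldl (fun acc l =>
      match normLang l with
      | none => acc
      | some n => if n ∈ acc then acc else acc ++ [n]) [o]
    let search2 := if search.length < 5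
      then fallbackLoop search ["fr","it","zh","ja","ru","ar","fi"] else search
    search2.take 5

-- ===== PORT B =====
-- the constant tail table _TAILS (keys Option String, None included)
def tailsDict : PySem.Dict (Option String) (List String) := PySem.Dict.ofList
  [(none, ["en","fr","it","zh","ja","ru","ar","fi"]),
   (some "fr", ["en","fr","it","zh","ja","ru","ar","fi"]),
   (some "it", ["en","it","fr","zh","ja","ru","ar","fi"]),
   (some "ja", ["en","ja","fr","zh","it","ru","ar","fi"]),
   (some "zh", ["en","zh","fr","ja","it","ru","ar","fi"]),
   (some "ru", ["en","ru","fr","it","zh","ja","ar","fi"])]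

def get_target_langs_py_alt (orig_lang : String) : List String :=
  match normLang (some orig_lang) with
  | none => ["en"]
  | some o =>
    let hA := PySem.Dict.get? langMap o
    -- _TAILS[hA]: a KeyError is impossible (hA is None or a value of language_to_high_resource,
    -- all of which are keys of _TAILS), so the getD default is never used
    let tail := (PySem.Dict.get? tailsDict hA).getD []
    o :: (tail.filter (fun x => x ≠ o)).take 4

-- ===== PRECONDITION & SPEC =====
def Spec_get_target_langs_py (orig_lang : String) (out : List String) : Prop := out = get_target_langs_py_alt orig_lang
instance (orig_lang : String) (out : List String) : Decidable (Spec_get_target_langs_py orig_lang out) := by unfold Spec_get_target_langs_py; infer_instance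

-- ===== CLAIM (what is proved, stated in full; the proofs are below) =====
def Claim_equal_get_target_langs_py : Prop := ∀ (orig_lang : String), Dom_get_target_langs_py orig_lang → Spec_get_target_langs_py orig_lang (get_target_langs_py orig_lang)

-- ===== LEMMAS AND PROOFS =====

theorem lowerChar_idem (c : Char) :
    PySem.Chars.lowerChar (PySem.Chars.lowerChar c) = PySem.Chars.lowerChar c := by
  simp only [PySem.Chars.lowerChar, PySem.Chars.isupper]
  split_ifs with h1 h2
  · exfalso
    simp only [Bool.and_eq_true, decide_eq_true_eq, Char.le_def] at h1 h2
    have hZ : c.toNat ≤ 90 := UInt32.le_iff_toNat_le.mp h1.2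
    have hA : 65 ≤ c.toNat := UInt32.le_iff_toNat_le.mp h1.1
    have hvalid : (c.toNat + 32).isValidChar := by left; omega
    have hv : (Char.ofNat (c.toNat + 32)).toNat = c.toNat + 32 := by
      rw [Char.toNat_ofNat]; simp [hvalid]
    have h65 : (Char.ofNat (c.toNat + 32)).toNat ≤ 90 := UInt32.le_iff_toNat_le.mp h2.2
    omega
  · rfl
  · rfl

theorem lower_idem (s : String) : PySem.Str.lower (PySem.Str.lower s) = PySem.Str.lower s := by
  simp [PySem.Str.lower, PySem.Chars.lower, List.map_map, Function.comp_def, lowerChar_idem]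

theorem lower_eq_empty_iff (s : String) : PySem.Str.lower s = "" ↔ s = "" := by
  constructor
  · intro h
    have h2 : (PySem.Str.lower s).toList = [] := by rw [h]; rfl
    rw [PySem.Str.toList_lower] at h2
    simpa [PySem.Chars.lower] using h2
  · intro h; subst h; rfl

theorem normLang_idem (x : Option String) : normLang (normLang x) = normLang x := by
  match x with
  | none => rfl
  | some lang =>
    by_cases he : lang = ""
    · simp [normLang, he]
    · simp only [normLang, he, if_false]
      by_cases h3 : PySem.Str.lower lang = "zh-cn" ∨ PySem.Str.lower lang = "zh_cn" ∨
          PySem.Str.lower lang = "zh-hans"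
      · have hb : (PySem.Str.lower lang = "zh-cn" || PySem.Str.lower lang = "zh_cn"
            || PySem.Str.lower lang = "zh-hans") = true := by
          rcases h3 with h | h | h <;> simp [h]
        simp only [hb, if_true]
        decide
      · have hb : (PySem.Str.lower lang = "zh-cn" || PySem.Str.lower lang = "zh_cn"
            || PySem.Str.lower lang = "zh-hans") = false := by
          simp only [Bool.or_eq_false_iff, decide_eq_false_iff_not]
          exact ⟨⟨fun h => h3 (Or.inl h), fun h => h3 (Or.inr (Or.inl h))⟩,
                 fun h => h3 (Or.inr (Or.inr h))⟩
        have hne : PySem.Str.lower lang ≠ "" := fun h => he ((lower_eq_empty_iff lang).mp h)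
        simp [hne, lower_idem, hb]

-- ===== VERDICT (by name: the statement is the Claim_ definition above) =====
theorem get_target_langs_py_spec : Claim_equal_get_target_langs_py := by
  intro orig_lang _
  unfold Spec_get_target_langs_py get_target_langs_py get_target_langs_py_alt
  rcases hn : normLang (some orig_lang) with _ | o
  · rfl
  · have hfix : normLang (some o) = some o := by
      have h := normLang_idem (some orig_lang); rw [hn] at h; exact h
    by_cases h1 : o = "fr"
    · subst h1; decide
    by_cases h2 : o = "es"
    · subst h2; decide
    by_cases h3 : o = "pt"
    · subst h3; decide
    by_cases h4 : o = "it"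
    · subst h4; decide
    by_cases h5 : o = "de"
    · subst h5; decide
    by_cases h6 : o = "en"
    · subst h6; decide
    by_cases h7 : o = "ru"
    · subst h7; decide
    by_cases h8 : o = "zh_cn"
    · subst h8; decide
    by_cases h9 : o = "zh"
    · subst h9; decide
    by_cases h10 : o = "ja"
    · subst h10; decide
    by_cases h11 : o = "ko"
    · subst h11; decide
    by_cases h12 : o = "th"
    · subst h12; decide
    by_cases h13 : o = "fi"
    · subst h13; decide
    by_cases h14 : o = "ar"
    · subst h14; decide

    -- non-key case: the dict lookup misses
    have hget : PySem.Dict.get? langMap o = none := by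
      rw [PySem.Dict.get?_eq_none_iff_not_mem_keys]
      have hk : PySem.Dict.keys langMap
          = ["fr","es","pt","it","de","en","ru","zh_cn","zh","ja","ko","th","fi","ar"] := by decide
      rw [hk]
      simp [h1, h2, h3, h4, h5, h6, h7, h8, h9, h10, h11, h12, h13, h14]
    have hhr : highRes (some o) = none := by simp only [highRes, hfix]; exact hget
    have hBen : highRes (some "en") = some "fr" := by decide
    have hTnone : (PySem.Dict.get? tailsDict none).getD []
        = ["en","fr","it","zh","ja","ru","ar","fi"] := by decide
    have hno : normLang none = none := rfl
    have hen : normLang (some "en") = some "en" := by decide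
    have hfr : normLang (some "fr") = some "fr" := by decide
    have hit : normLang (some "it") = some "it" := by decide
    have hzh : normLang (some "zh") = some "zh" := by decide
    have g6 : ¬ ("en" = o) := fun h => h6 h.symm
    have g1 : ¬ ("fr" = o) := fun h => h1 h.symm
    have g4 : ¬ ("it" = o) := fun h => h4 h.symm
    have g9 : ¬ ("zh" = o) := fun h => h9 h.symm
    have g10 : ¬ ("ja" = o) := fun h => h10 h.symm
    have g7 : ¬ ("ru" = o) := fun h => h7 h.symm
    have g14 : ¬ ("ar" = o) := fun h => h14 h.symm
    have g13 : ¬ ("fi" = o) := fun h => h13 h.symm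
    simp only [hhr, hBen, hget, hTnone, Option.isSome_none, Bool.false_eq_true, if_false,
      List.foldl_cons, List.foldl_nil, hen, hfr]
    simp [fallbackLoop, hno, hfr, hit, hzh,
      g1, g4, g6, g7, g9, g10, g13, g14]
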